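-- pv_equiv track=rewrite | github.com/bytesapart/foobar | p2a/solution.py | greedy_rationing
-- ===== SOURCE A (Python) =====
-- def greedy_rationing(total_lambs):
--     pay = 1  # Keep the base pay as 1 for the lowest henchman.
--     henchman_number = 0  # The henchman number
--     while True:
--         henchman_number += 1
--         if total_lambs <= 0:
--             break
--         pay *= 2
--         total_lambs -= pay
--
--     return henchman_number
-- ===== SOURCE B (Python) =====
-- def greedy_rationing(total_lambs):
--     if total_lambs <= 0:
--         return 1
--     return (total_lambs + 1).bit_length()
-- ===== Notes on version B (the rewrite author's own statement) =====
-- stated objective: simpler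
-- what changed: Replaces the doubling while-loop and running subtraction with a closed form: the answer is 1 for non-positive input, otherwise (total_lambs + 1).bit_length().
import Mathlib
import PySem

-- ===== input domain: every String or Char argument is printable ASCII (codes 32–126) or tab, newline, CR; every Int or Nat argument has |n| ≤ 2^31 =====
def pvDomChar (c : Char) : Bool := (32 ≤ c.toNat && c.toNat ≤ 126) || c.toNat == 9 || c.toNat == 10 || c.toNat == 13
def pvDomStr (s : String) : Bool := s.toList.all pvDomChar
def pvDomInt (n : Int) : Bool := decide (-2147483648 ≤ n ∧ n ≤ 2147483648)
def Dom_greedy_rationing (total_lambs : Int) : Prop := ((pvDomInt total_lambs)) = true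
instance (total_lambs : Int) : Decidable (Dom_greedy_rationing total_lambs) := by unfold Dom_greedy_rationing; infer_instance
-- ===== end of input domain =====

-- B replaces A's doubling while-loop with the closed form (total_lambs+1).bit_length() (1 for non-positive input): simpler, no loop.


-- ===== PORT A =====
-- The 'while True' loop; fuel is only a totality guard (total_lambs shrinks by at least 2
-- per iteration, so fuel = total_lambs.toNat + 1 never runs out before the Python break fires;
-- the fuel-0 branch returns the same 'henchman_number + 1' the break would).
def greedyLoop (fuel : Nat) (total_lambs pay henchman_number : Int) : Int :=
  match fuel with
  | 0 => henchman_number + 1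
  | fuel + 1 =>
    -- henchman_number += 1
    if total_lambs ≤ 0 then henchman_number + 1          -- break; return henchman_number
    else greedyLoop fuel (total_lambs - pay * 2) (pay * 2) (henchman_number + 1)

def greedy_rationing (total_lambs : Int) : Int :=
  greedyLoop (total_lambs.toNat + 1) total_lambs 1 0

-- ===== PORT B =====
-- (total_lambs + 1).bit_length() is PySem.Int.bitLength (Python-exact).
def greedy_rationing_alt (total_lambs : Int) : Int :=
  if total_lambs ≤ 0 then 1
  else (PySem.Int.bitLength (total_lambs + 1) : Int)

-- ===== PRECONDITION & SPEC =====
def Spec_greedy_rationing (total_lambs : Int) (out : Int) : Prop := out = greedy_rationing_alt total_lambs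
instance (total_lambs : Int) (out : Int) : Decidable (Spec_greedy_rationing total_lambs out) := by unfold Spec_greedy_rationing; infer_instance

-- ===== CLAIM (what is proved, stated in full; the proofs are below) =====
def Claim_equal_greedy_rationing : Prop := ∀ (total_lambs : Int), Dom_greedy_rationing total_lambs → Spec_greedy_rationing total_lambs (greedy_rationing total_lambs)

-- ===== LEMMAS AND PROOFS =====

-- Main loop invariant: with pay = 2^k and t ≥ 1, the loop returns
-- h + bitLength ((t.toNat - 1) / 2^(k+1) + 1) + 1, provided fuel ≥ t.toNat.
theorem greedyLoop_closed (fuel : Nat) : ∀ (t : Int) (k : Nat) (h : Int),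
    1 ≤ t → t.toNat ≤ fuel →
    greedyLoop fuel t (2 ^ k) h
      = h + (PySem.Int.bitLength (((t.toNat - 1) / 2 ^ (k + 1) + 1 : Nat) : Int) : Int) + 1 := by
  induction fuel with
  | zero => intro t k h ht hf; omega
  | succ fuel ih =>
    intro t k h ht hf
    have hnle : ¬ t ≤ 0 := by omega
    simp only [greedyLoop, hnle, if_false]
    have hpay : (2 ^ k : Int) * 2 = 2 ^ (k + 1) := by ring
    rw [hpay]
    by_cases hdone : t - 2 ^ (k + 1) ≤ 0
    · -- next check breaks (whether fuel = 0 or not, the result is h + 2)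
      have hres : greedyLoop fuel (t - 2 ^ (k + 1)) (2 ^ (k + 1)) (h + 1) = h + 2 := by
        cases fuel with
        | zero => simp [greedyLoop]; ring
        | succ m => simp only [greedyLoop, hdone, if_true]; ring
      rw [hres]
      have hsmall : (t.toNat - 1) / 2 ^ (k + 1) = 0 := by
        apply Nat.div_eq_of_lt
        have h2 : (2 : Int) ^ (k + 1) = ((2 ^ (k + 1) : Nat) : Int) := by push_cast; ring
        omega
      rw [hsmall]
      have hb1 : PySem.Int.bitLength ((0 + 1 : Nat) : Int) = 1 := by decide
      rw [hb1]; ring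
    · -- recurse; apply the IH at k+1
      have h2c : (2 : Int) ^ (k + 1) = ((2 ^ (k + 1) : Nat) : Int) := by push_cast; ring
      have hpos2 : (1 : Nat) ≤ 2 ^ (k + 1) := Nat.one_le_two_pow
      have ht' : 1 ≤ t - 2 ^ (k + 1) := by omega
      have htn' : (t - 2 ^ (k + 1)).toNat = t.toNat - 2 ^ (k + 1) := by omega
      have hf' : (t - 2 ^ (k + 1)).toNat ≤ fuel := by
        have : (2 : Nat) ≤ 2 ^ (k + 1) := by
          calc (2 : Nat) = 2 ^ 1 := rfl
          _ ≤ 2 ^ (k + 1) := Nat.pow_le_pow_right (by omega) (by omega)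
        omega
      rw [ih (t - 2 ^ (k + 1)) (k + 1) (h + 1) ht' hf']
      -- arithmetic: bitLength ((a-1)/2^(k+1) + 1) = bitLength (((a - 2^(k+1) - 1)/2^(k+2) + 1)) + 1
      set a := t.toNat with ha
      have hge : 2 ^ (k + 1) + 1 ≤ a := by omega
      have hq1 : 1 ≤ (a - 1) / 2 ^ (k + 1) := by
        apply (Nat.le_div_iff_mul_le (by positivity)).2; omega
      have hm2 : 2 ≤ (a - 1) / 2 ^ (k + 1) + 1 := by omega
      have hstep : ((a - 1) / 2 ^ (k + 1) + 1) / 2 = ((t - 2 ^ (k + 1)).toNat - 1) / 2 ^ (k + 1 + 1) + 1 := by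
        rw [htn']
        have hsub : (a - 2 ^ (k + 1) - 1) / 2 ^ (k + 1) = (a - 1) / 2 ^ (k + 1) - 1 := by
          have heq : a - 2 ^ (k + 1) - 1 = (a - 1) - 2 ^ (k + 1) * 1 := by omega
          rw [heq, Nat.sub_mul_div]
        have hdd : (a - 2 ^ (k + 1) - 1) / 2 ^ (k + 1 + 1) = ((a - 1) / 2 ^ (k + 1) - 1) / 2 := by
          rw [← hsub, Nat.div_div_eq_div_mul, ← pow_succ]
        rw [hdd]
        omega
      rw [PySem.Int.bitLength_natCast (show 0 < (a - 1) / 2 ^ (k + 1) + 1 by omega), hstep]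
      push_cast
      ring

-- bitLength (t+1) agrees with the loop's closed form at k = 0.
theorem bitLength_succ_halve (t : Int) (ht : 1 ≤ t) :
    PySem.Int.bitLength (t + 1) = PySem.Int.bitLength (((t.toNat - 1) / 2 + 1 : Nat) : Int) + 1 := by
  have hcast : t + 1 = ((t.toNat + 1 : Nat) : Int) := by omega
  rw [hcast, PySem.Int.bitLength_natCast (by omega)]
  have : (t.toNat + 1) / 2 = (t.toNat - 1) / 2 + 1 := by omega
  rw [this]

-- ===== VERDICT (by name: the statement is the Claim_ definition above) =====
theorem greedy_rationing_spec : Claim_equal_greedy_rationing := by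
  intro total_lambs _
  unfold Spec_greedy_rationing greedy_rationing greedy_rationing_alt
  by_cases hle : total_lambs ≤ 0
  · have : total_lambs.toNat = 0 := by omega
    simp [greedyLoop, hle]
  · have h1 : 1 ≤ total_lambs := by omega
    have := greedyLoop_closed (total_lambs.toNat + 1) total_lambs 0 0 h1 (by omega)
    rw [show ((2 : Int) ^ 0 = 1) from rfl] at this
    rw [this, if_neg hle, bitLength_succ_halve total_lambs h1]
    push_cast
    ring
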